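-- pv_equiv track=rewrite | github.com/XiongXin1207/Compilers | LL(1)/LL(1).py | hascmprefix
-- ===== SOURCE A (Python) =====
-- def hascmprefix(l):
--     st = set()
--     for i in l:
--         st.add(i[0])
--     if len(st) == len(l):
--         return False
--     else:
--         return True
-- ===== SOURCE B (Python) =====
-- def hascmprefix(l):
--     firsts = [i[0] for i in l]
--     firsts.sort()
--     for a, b in zip(firsts, firsts[1:]):
--         if a == b:
--             return True
--     return False
-- ===== Notes on version B (the rewrite author's own statement) =====
-- stated objective: alternative
-- what changed: Replaces A's set-of-first-chars cardinality comparison with a sort of the first characters followed by a single adjacent-equality scan.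
import Mathlib
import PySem

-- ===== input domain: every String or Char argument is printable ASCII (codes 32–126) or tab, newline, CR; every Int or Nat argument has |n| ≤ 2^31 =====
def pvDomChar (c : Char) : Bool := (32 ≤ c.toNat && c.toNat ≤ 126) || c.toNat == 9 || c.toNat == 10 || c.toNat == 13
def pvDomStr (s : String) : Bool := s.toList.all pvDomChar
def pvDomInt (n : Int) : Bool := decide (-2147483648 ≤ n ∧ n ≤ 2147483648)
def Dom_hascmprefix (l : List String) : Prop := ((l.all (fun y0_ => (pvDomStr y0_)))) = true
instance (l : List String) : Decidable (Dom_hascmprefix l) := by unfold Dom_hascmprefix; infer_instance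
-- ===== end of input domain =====

-- B replaces A's set-of-first-chars cardinality test by sorting the first characters and
-- scanning once for an equal adjacent pair (alternative algorithm, same result).

-- ===== PORT A =====
-- i[0] is PySem.Str.pyGet?; 'none' (IndexError on an empty-string element) lies outside
-- Pre_hascmprefix, so the '.getD ' '' default is never reached on admitted inputs.
def hascmprefix (l : List String) : Bool :=
  let st : PySem.Set Char :=
    l.foldl (fun st i => PySem.Set.add st ((PySem.Str.pyGet? i 0).getD ' ')) PySem.Set.empty
  if st.length = l.length then false else true

-- ===== PORT B =====
-- the 'for a, b in zip(firsts, firsts[1:])' adjacent scan of Source B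
def pvAdjDup : List Char → Bool
  | a :: b :: t => if a = b then true else pvAdjDup (b :: t)
  | _ => false

def hascmprefix_alt (l : List String) : Bool :=
  let firsts := l.map (fun i => (PySem.Str.pyGet? i 0).getD ' ')
  pvAdjDup (PySem.List.sorted firsts (fun x => x) false)

-- ===== PRECONDITION & SPEC =====
-- Pre_ excludes only lists containing an empty string, on which both A and B raise IndexError at i[0].
def Pre_hascmprefix (l : List String) : Prop := ∀ s ∈ l, s ≠ ""
instance (l : List String) : Decidable (Pre_hascmprefix l) := by unfold Pre_hascmprefix; infer_instance
def pvWitness_hascmprefix : List String := (["ab", "cd", "ax"])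

def Spec_hascmprefix (l : List String) (out : Bool) : Prop := out = hascmprefix_alt l
instance (l : List String) (out : Bool) : Decidable (Spec_hascmprefix l out) := by unfold Spec_hascmprefix; infer_instance

-- ===== CLAIM (what is proved, stated in full; the proofs are below) =====
def Claim_equal_hascmprefix : Prop := ∀ (l : List String), Dom_hascmprefix l → Pre_hascmprefix l → Spec_hascmprefix l (hascmprefix l)

-- ===== LEMMAS AND PROOFS =====

-- folding Set.add never grows the accumulator by more than one element per input
theorem pv_len_foldl_add {α : Type} [BEq α] [LawfulBEq α] (xs : List α) (s : PySem.Set α) :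
    (xs.foldl PySem.Set.add s).length ≤ s.length + xs.length := by
  induction xs generalizing s with
  | nil => simp
  | cons x xs ih =>
    simp only [List.foldl_cons, List.length_cons]
    have h := ih (PySem.Set.add s x)
    have hadd : (PySem.Set.add s x).length ≤ s.length + 1 := by
      unfold PySem.Set.add; split <;> simp
    omega

theorem pv_mem_add {α : Type} [BEq α] [LawfulBEq α] (s : PySem.Set α) (x : α) :
    x ∈ PySem.Set.add s x := by
  unfold PySem.Set.add; split
  · next h => exact List.contains_iff_mem.mp h
  · simp

theorem pv_mem_add_of_mem {α : Type} [BEq α] [LawfulBEq α] (s : PySem.Set α) (x y : α)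
    (h : y ∈ s) : y ∈ PySem.Set.add s x := by
  unfold PySem.Set.add; split
  · exact h
  · simp [h]

-- a fold that re-adds an element already in the accumulator stays strictly short
theorem pv_len_foldl_add_lt_of_mem {α : Type} [BEq α] [LawfulBEq α] (xs : List α)
    (s : PySem.Set α) (x : α) (hx : x ∈ xs) (hs : x ∈ s) :
    (xs.foldl PySem.Set.add s).length < s.length + xs.length := by
  induction xs generalizing s with
  | nil => simp at hx
  | cons y ys ih =>
    simp only [List.foldl_cons, List.length_cons]
    rcases List.mem_cons.mp hx with rfl | hxys
    · have heq : PySem.Set.add s x = s := by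
        unfold PySem.Set.add
        rw [if_pos (by simpa using hs)]
      rw [heq]
      have := pv_len_foldl_add ys s
      omega
    · have hlt := ih (PySem.Set.add s y) hxys (pv_mem_add_of_mem s y x hs)
      have hadd : (PySem.Set.add s y).length ≤ s.length + 1 := by
        unfold PySem.Set.add; split <;> simp
      omega

theorem pv_len_foldl_add_lt_of_not_nodup {α : Type} [BEq α] [LawfulBEq α] (xs : List α)
    (s : PySem.Set α) (h : ¬ xs.Nodup) :
    (xs.foldl PySem.Set.add s).length < s.length + xs.length := by
  induction xs generalizing s with
  | nil => exact absurd List.nodup_nil h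
  | cons x ys ih =>
    simp only [List.foldl_cons, List.length_cons]
    by_cases hx : x ∈ ys
    · have := pv_len_foldl_add_lt_of_mem ys (PySem.Set.add s x) x hx (pv_mem_add s x)
      have hadd : (PySem.Set.add s x).length ≤ s.length + 1 := by
        unfold PySem.Set.add; split <;> simp
      omega
    · have hys : ¬ ys.Nodup := by
        intro hnd; exact h (List.nodup_cons.mpr ⟨hx, hnd⟩)
      have := ih (PySem.Set.add s x) hys
      have hadd : (PySem.Set.add s x).length ≤ s.length + 1 := by
        unfold PySem.Set.add; split <;> simp
      omega

-- on a duplicate-free list the fold just appends everything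
theorem pv_foldl_add_of_nodup {α : Type} [BEq α] [LawfulBEq α] (xs : List α)
    (s : PySem.Set α) (hnd : xs.Nodup) (hdisj : ∀ x ∈ xs, x ∉ s) :
    xs.foldl PySem.Set.add s = s ++ xs := by
  induction xs generalizing s with
  | nil => simp
  | cons x ys ih =>
    simp only [List.foldl_cons]
    have hxs : x ∉ s := hdisj x (List.mem_cons_self)
    have heq : PySem.Set.add s x = s ++ [x] := by
      unfold PySem.Set.add
      simp [hxs]
    rw [heq, ih (s ++ [x]) (List.nodup_cons.mp hnd).2]
    · simp
    · intro y hy hmem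
      rcases List.mem_append.mp hmem with h1 | h2
      · exact hdisj y (List.mem_cons_of_mem x hy) h1
      · have : y = x := List.mem_singleton.mp h2
        exact (List.nodup_cons.mp hnd).1 (this ▸ hy)

-- A's test: |set(fs)| = |fs| iff fs has no duplicates
theorem pv_ofList_len_iff {α : Type} [BEq α] [LawfulBEq α] (xs : List α) :
    (xs.foldl PySem.Set.add PySem.Set.empty).length = xs.length ↔ xs.Nodup := by
  constructor
  · intro h
    by_contra hnd
    have := pv_len_foldl_add_lt_of_not_nodup xs PySem.Set.empty hnd
    simp only [PySem.Set.empty, List.length_nil, Nat.zero_add] at this h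
    omega
  · intro hnd
    rw [pv_foldl_add_of_nodup xs PySem.Set.empty hnd (by intro x _ hx; simp [PySem.Set.empty] at hx)]
    simp [PySem.Set.empty]

-- B's scan: on a weakly sorted list, no equal adjacent pair iff no duplicates at all
theorem pv_adjDup_iff (cs : List Char) (h : cs.Pairwise (· ≤ ·)) :
    pvAdjDup cs = false ↔ cs.Nodup := by
  induction cs with
  | nil => simp [pvAdjDup]
  | cons a t ih =>
    match t, h with
    | [], _ => simp [pvAdjDup]
    | b :: t, h =>
      have hpw := List.pairwise_cons.mp h
      by_cases hab : a = b
      · subst hab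
        simp only [pvAdjDup, if_true]
        constructor
        · intro hf; exact absurd hf (by simp)
        · intro hnd
          exact absurd (List.mem_cons_self) (List.nodup_cons.mp hnd).1
      · simp only [pvAdjDup, if_neg hab]
        rw [ih hpw.2]
        constructor
        · intro hnd
          refine List.nodup_cons.mpr ⟨?_, hnd⟩
          intro hmem
          rcases List.mem_cons.mp hmem with rfl | hat
          · exact hab rfl
          · have h1 : a ≤ b := hpw.1 b (List.mem_cons_self)
            have h2 : b ≤ a := (List.pairwise_cons.mp hpw.2).1 a hat
            exact hab (le_antisymm h1 h2)
        · intro hnd; exact (List.nodup_cons.mp hnd).2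

-- ===== VERDICT (by name: the statement is the Claim_ definition above) =====
theorem hascmprefix_spec : Claim_equal_hascmprefix := by
  intro l _ _
  unfold Spec_hascmprefix hascmprefix hascmprefix_alt
  set f : String → Char := fun i => (PySem.Str.pyGet? i 0).getD ' ' with hf
  have hfold : l.foldl (fun st i => PySem.Set.add st (f i)) PySem.Set.empty
      = (l.map f).foldl PySem.Set.add PySem.Set.empty := by rw [List.foldl_map]
  have hlen : (l.map f).length = l.length := List.length_map ..
  have hA : ((l.foldl (fun st i => PySem.Set.add st (f i)) PySem.Set.empty).length = l.length)
      ↔ (l.map f).Nodup := by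
    rw [hfold, ← hlen]; exact pv_ofList_len_iff (l.map f)
  have hpw : (PySem.List.sorted (l.map f) (fun x => x) false).Pairwise (· ≤ ·) :=
    PySem.List.sorted_pairwise (l.map f) (fun x => x)
  have hB : pvAdjDup (PySem.List.sorted (l.map f) (fun x => x) false) = false ↔ (l.map f).Nodup := by
    rw [pv_adjDup_iff _ hpw]
    exact (PySem.List.sorted_perm (l.map f) (fun x => x) false).nodup_iff
  by_cases hnd : (l.map f).Nodup
  · rw [if_pos (hA.mpr hnd), (hB.mpr hnd)]
  · rw [if_neg (fun h => hnd (hA.mp h))]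
    rcases Bool.eq_false_or_eq_true (pvAdjDup (PySem.List.sorted (l.map f) (fun x => x) false)) with hb | hb
    · show true = pvAdjDup (PySem.List.sorted (l.map f) (fun x => x) false)
      exact hb.symm
    · exact absurd (hB.mp hb) hnd
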